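-- pv_equiv track=rewrite | github.com/Nuno09/clusterval | clustereval/external.py | huberts
-- ===== SOURCE A (Python) =====
-- def huberts(C, P):
--     import itertools
--
--     # join clusters in one to find possible pair combinations
--     concat_cluster = list(itertools.chain.from_iterable(C))
--     pairs = list(itertools.combinations(concat_cluster, 2))
--
--     X = build_hubert_matrix(C, pairs)
--     Y = build_hubert_matrix(P, pairs)
--
--     index = 0
--     for pair in pairs:
--         index = index + (X[pair] * Y[pair])
--
--     return index
--
-- def build_hubert_matrix(C, pairs):
--     from collections import defaultdict
--
--     X = defaultdict(tuple)
--
--     # transform list of clusters in dictionary of clusters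
--     dict_clusters = {i: c for i, c in enumerate(C)}
--
--     #X(i,j) = 1 if both in the same cluster, 0 otherwise
--     for el in pairs:
--         for k, v in dict_clusters.items():
--             if (el[0] in v) and (el[1] in v):
--                 X[el] = 1
--         if not X.get(el, False):
--             X[el] = 0
--
--     return X
-- ===== SOURCE B (Python) =====
-- from itertools import combinations
--
--
-- def _sig(x, clusters):
--     # indices of the clusters that contain x
--     return [k for k, cl in enumerate(clusters) if x in cl]
--
--
-- def _meets(a, b):
--     return any(k in b for k in a)
--
--
-- def huberts(C, P):
--     flat = [x for cl in C for x in cl]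
--     sigs = [(_sig(x, C), _sig(x, P)) for x in flat]
--     return sum(1 for (c1, p1), (c2, p2) in combinations(sigs, 2)
--                if _meets(c1, c2) and _meets(p1, p2))
-- ===== Notes on version B (the rewrite author's own statement) =====
-- stated objective: faster
-- what changed: Instead of materialising the pair list and building two pair-keyed dicts by scanning every cluster's members for every pair, B precomputes once per element the list of cluster indices containing it and counts pairs whose index lists intersect in both partitions.
import Mathlib
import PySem

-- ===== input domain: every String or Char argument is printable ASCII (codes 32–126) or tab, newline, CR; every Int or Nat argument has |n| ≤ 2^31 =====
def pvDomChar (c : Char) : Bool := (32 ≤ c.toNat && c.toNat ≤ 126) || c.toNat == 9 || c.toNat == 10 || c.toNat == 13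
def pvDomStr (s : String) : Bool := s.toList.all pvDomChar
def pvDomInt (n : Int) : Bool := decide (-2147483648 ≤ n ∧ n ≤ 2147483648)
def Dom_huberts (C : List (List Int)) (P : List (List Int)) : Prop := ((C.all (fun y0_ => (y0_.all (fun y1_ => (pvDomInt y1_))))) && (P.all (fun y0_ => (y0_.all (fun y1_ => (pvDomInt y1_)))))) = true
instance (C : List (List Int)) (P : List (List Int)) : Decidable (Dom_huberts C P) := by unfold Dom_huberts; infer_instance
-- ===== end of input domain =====

-- B precomputes per-element cluster-index signatures once, replacing A's per-pair scans
-- over every cluster's members (objective: faster).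


-- ===== PORT A =====
-- itertools.combinations(xs, 2) in generation order
def combos2 {α : Type} : List α → List (α × α)
  | [] => []
  | x :: rest => rest.map (fun y => (x, y)) ++ combos2 rest

-- body of "for k, v in dict_clusters.items(): if (el[0] in v) and (el[1] in v): X[el] = 1"
def innerScan (items : List (Int × List Int)) (X : PySem.Dict (Int × Int) Int)
    (el : Int × Int) : PySem.Dict (Int × Int) Int :=
  items.foldl (fun X kv => if el.1 ∈ kv.2 ∧ el.2 ∈ kv.2 then X.insert el 1 else X) X

-- "if not X.get(el, False): X[el] = 0" (values are ints, so truthy ↔ ≠ 0)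
def hubFinish (X' : PySem.Dict (Int × Int) Int) (el : Int × Int) :
    PySem.Dict (Int × Int) Int :=
  match X'.get? el with
  | some v => if v = 0 then X'.insert el 0 else X'
  | none => X'.insert el 0

def hubStep (items : List (Int × List Int)) (X : PySem.Dict (Int × Int) Int)
    (el : Int × Int) : PySem.Dict (Int × Int) Int :=
  hubFinish (innerScan items X el) el

def buildHubertMatrix (C : List (List Int)) (pairs : List (Int × Int)) :
    PySem.Dict (Int × Int) Int :=
  -- {i: c for i, c in enumerate(C)} built by successive insertion
  let dictClusters : PySem.Dict Int (List Int) :=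
    (PySem.List.enumerate C).foldl (fun d kv => d.insert kv.1 kv.2) PySem.Dict.empty
  pairs.foldl (hubStep dictClusters.items) PySem.Dict.empty

def huberts (C : List (List Int)) (P : List (List Int)) : Int :=
  let concat_cluster := C.flatten
  let pairs := combos2 concat_cluster
  let X := buildHubertMatrix C pairs
  let Y := buildHubertMatrix P pairs
  -- X[pair]: every pair was keyed by the build loop, so the defaultdict default () is
  -- never produced; getD _ 0 is exact on all reachable states
  pairs.foldl (fun index pair => index + X.getD pair 0 * Y.getD pair 0) 0

-- ===== PORT B =====
-- _sig: indices of the clusters that contain x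
def sigB (x : Int) (clusters : List (List Int)) : List Int :=
  (PySem.List.enumerate clusters).filterMap
    (fun kv => if x ∈ kv.2 then some kv.1 else none)

-- _meets: any(k in b for k in a)
def meetsB (a b : List Int) : Bool := a.any (fun k => b.contains k)

def huberts_alt (C : List (List Int)) (P : List (List Int)) : Int :=
  let flat := C.flatten
  let sigs := flat.map (fun x => (sigB x C, sigB x P))
  ((combos2 sigs).countP
    (fun q => meetsB q.1.1 q.2.1 && meetsB q.1.2 q.2.2) : Nat)

-- ===== PRECONDITION & SPEC =====
def Spec_huberts (C : List (List Int)) (P : List (List Int)) (out : Int) : Prop := out = huberts_alt C P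
instance (C : List (List Int)) (P : List (List Int)) (out : Int) : Decidable (Spec_huberts C P out) := by unfold Spec_huberts; infer_instance

-- ===== CLAIM (what is proved, stated in full; the proofs are below) =====
def Claim_equal_huberts : Prop := ∀ (C : List (List Int)) (P : List (List Int)), Dom_huberts C P → Spec_huberts C P (huberts C P)

-- ===== LEMMAS AND PROOFS =====

-- co-clustered indicator: some cluster of C contains both a and b
def coB (C : List (List Int)) (a b : Int) : Bool :=
  C.any (fun v => decide (a ∈ v) && decide (b ∈ v))

theorem combos2_map {α β : Type} (f : α → β) (l : List α) :
    combos2 (l.map f) = (combos2 l).map (Prod.map f f) := by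
  induction l with
  | nil => rfl
  | cons x rest ih => simp [combos2, ih, Function.comp_def]

theorem mem_sigB (k x : Int) (C : List (List Int)) :
    k ∈ sigB x C ↔ ∃ (j : Nat) (h : j < C.length), k = (j : Int) ∧ x ∈ C[j] := by
  simp only [sigB, List.mem_filterMap, PySem.List.mem_enumerate_iff]
  constructor
  · rintro ⟨kv, ⟨j, hj, rfl⟩, h⟩
    simp only [ite_eq_iff] at h
    rcases h with ⟨hx, hk⟩ | ⟨_, h⟩
    · exact ⟨j, hj, by simpa using hk.symm, hx⟩
    · cases h
  · rintro ⟨j, hj, rfl, hx⟩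
    exact ⟨((j : Int), C[j]), ⟨j, hj, by simp⟩, by simp [hx]⟩

theorem meetsB_sigB (C : List (List Int)) (a b : Int) :
    meetsB (sigB a C) (sigB b C) = coB C a b := by
  have : (meetsB (sigB a C) (sigB b C) = true) ↔ (coB C a b = true) := by
    simp only [meetsB, coB, List.any_eq_true, List.contains_iff_mem,
      Bool.and_eq_true, decide_eq_true_eq]
    constructor
    · rintro ⟨k, hka, hkb⟩
      rcases (mem_sigB k a C).1 hka with ⟨j, hj, rfl, hxa⟩
      rcases (mem_sigB (j : Int) b C).1 hkb with ⟨j', hj', hjj, hxb⟩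
      have : j = j' := by exact_mod_cast hjj
      subst this
      exact ⟨C[j], List.getElem_mem hj, hxa, hxb⟩
    · rintro ⟨v, hv, ha, hb⟩
      rcases List.getElem_of_mem hv with ⟨j, hj, rfl⟩
      exact ⟨(j : Int), (mem_sigB _ _ _).2 ⟨j, hj, rfl, ha⟩,
        (mem_sigB _ _ _).2 ⟨j, hj, rfl, hb⟩⟩
  exact Bool.coe_iff_coe.mp this

-- the per-pair cluster scan, as a predicate on the items list
def condA (items : List (Int × List Int)) (el : Int × Int) : Bool :=
  items.any (fun kv => decide (el.1 ∈ kv.2) && decide (el.2 ∈ kv.2))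

theorem innerScan_get_self (items : List (Int × List Int))
    (X : PySem.Dict (Int × Int) Int) (el : Int × Int) :
    (innerScan items X el).get? el
      = if condA items el then some 1 else X.get? el := by
  induction items generalizing X with
  | nil => simp [innerScan, condA]
  | cons kv rest ih =>
    simp only [innerScan, List.foldl_cons] at *
    by_cases h : el.1 ∈ kv.2 ∧ el.2 ∈ kv.2
    · rw [if_pos h, ih]
      have hd : condA (kv :: rest) el = true := by
        simp [condA, List.any_cons, h.1, h.2]
      simp only [hd, if_true]
      split
      · rfl
      · exact PySem.Dict.get?_insert_self _ _ _
    · have hfalse : (decide (el.1 ∈ kv.2) && decide (el.2 ∈ kv.2)) = false := by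
        rcases not_and_or.mp h with h1 | h1 <;> simp [h1]
      have hd : condA (kv :: rest) el = condA rest el := by
        simp [condA, List.any_cons, hfalse]
      rw [if_neg h, ih]
      simp only [hd]

theorem innerScan_get_other (items : List (Int × List Int))
    (X : PySem.Dict (Int × Int) Int) (el q : Int × Int) (hne : q ≠ el) :
    (innerScan items X el).get? q = X.get? q := by
  induction items generalizing X with
  | nil => rfl
  | cons kv rest ih =>
    simp only [innerScan, List.foldl_cons] at *
    rw [ih]
    split
    · exact PySem.Dict.get?_insert_of_ne _ _ hne
    · rfl

theorem hubFinish_get_other (X' : PySem.Dict (Int × Int) Int) (el q : Int × Int)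
    (hne : q ≠ el) : (hubFinish X' el).get? q = X'.get? q := by
  unfold hubFinish
  split
  · split
    · exact PySem.Dict.get?_insert_of_ne _ _ hne
    · rfl
  · exact PySem.Dict.get?_insert_of_ne _ _ hne

def InvA (items : List (Int × List Int)) (X : PySem.Dict (Int × Int) Int) : Prop :=
  ∀ q, X.get? q = none ∨ X.get? q = some (if condA items q then 1 else 0)

theorem hubStep_get_self (items : List (Int × List Int))
    (X : PySem.Dict (Int × Int) Int) (el : Int × Int) (hInv : InvA items X) :
    (hubStep items X el).get? el = some (if condA items el then 1 else 0) := by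
  unfold hubStep hubFinish
  by_cases hc : condA items el = true
  · rw [innerScan_get_self, hc]
    simp [innerScan_get_self, hc]
  · simp only [Bool.not_eq_true] at hc
    have hscan : (innerScan items X el).get? el = X.get? el := by
      rw [innerScan_get_self, hc]; simp
    rcases hInv el with h | h
    · rw [hscan, h]
      simp [hc, PySem.Dict.get?_insert_self]
    · rw [hscan, h]
      simp only [hc, Bool.false_eq_true, if_false] at h ⊢
      simp [PySem.Dict.get?_insert_self]

theorem hubStep_get_other (items : List (Int × List Int))
    (X : PySem.Dict (Int × Int) Int) (el q : Int × Int) (hne : q ≠ el) :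
    (hubStep items X el).get? q = X.get? q := by
  unfold hubStep
  rw [hubFinish_get_other _ _ _ hne, innerScan_get_other _ _ _ _ hne]

theorem hubStep_inv (items : List (Int × List Int))
    (X : PySem.Dict (Int × Int) Int) (el : Int × Int) (hInv : InvA items X) :
    InvA items (hubStep items X el) := by
  intro q
  by_cases hq : q = el
  · subst hq
    right; exact hubStep_get_self items X q hInv
  · rw [hubStep_get_other items X el q hq]
    exact hInv q

theorem foldl_hubStep_untouched (items : List (Int × List Int))
    (pairs : List (Int × Int)) (X : PySem.Dict (Int × Int) Int)
    (q : Int × Int) (hq : q ∉ pairs) :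
    (pairs.foldl (hubStep items) X).get? q = X.get? q := by
  induction pairs generalizing X with
  | nil => rfl
  | cons el rest ih =>
    simp only [List.mem_cons, not_or] at hq
    simp only [List.foldl_cons]
    rw [ih _ hq.2, hubStep_get_other items X el q hq.1]

theorem foldl_hubStep_get (items : List (Int × List Int))
    (pairs : List (Int × Int)) (X : PySem.Dict (Int × Int) Int)
    (hInv : InvA items X) (p : Int × Int) (hp : p ∈ pairs) :
    (pairs.foldl (hubStep items) X).get? p = some (if condA items p then 1 else 0) := by
  induction pairs generalizing X with
  | nil => cases hp
  | cons el rest ih =>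
    simp only [List.foldl_cons]
    by_cases hpr : p ∈ rest
    · exact ih _ (hubStep_inv items X el hInv) hpr
    · have hpe : p = el := by
        rcases List.mem_cons.mp hp with h | h
        · exact h
        · exact absurd h hpr
      subst hpe
      rw [foldl_hubStep_untouched items rest _ p hpr]
      exact hubStep_get_self items X p hInv

theorem fst_enumerate_nodup (C : List (List Int)) :
    ((PySem.List.enumerate C).map (fun kv => kv.1)).Nodup := by
  have h := PySem.List.pairwise_lt_enumerate C 0
  exact List.pairwise_map.mpr (h.imp (fun hlt => ne_of_lt hlt))

theorem dictClusters_items (C : List (List Int)) :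
    ((PySem.List.enumerate C).foldl (fun d kv => d.insert kv.1 kv.2)
      (PySem.Dict.empty : PySem.Dict Int (List Int))).items
      = PySem.List.enumerate C := by
  have h := PySem.Dict.items_foldl_insert_fresh (l := PySem.List.enumerate C)
    (k := fun kv => kv.1) (v := fun kv => kv.2)
    (d := (PySem.Dict.empty : PySem.Dict Int (List Int)))
    (by intro a _; exact PySem.Dict.contains_empty _)
    (fst_enumerate_nodup C)
  simpa using h

theorem condA_enumerate (C : List (List Int)) (el : Int × Int) :
    condA (PySem.List.enumerate C) el = coB C el.1 el.2 := by
  unfold condA coB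
  conv_rhs => rw [← PySem.List.map_snd_enumerate C 0, List.any_map]
  rfl

theorem buildHubertMatrix_getD (C : List (List Int)) (pairs : List (Int × Int))
    (p : Int × Int) (hp : p ∈ pairs) :
    (buildHubertMatrix C pairs).getD p 0 = if coB C p.1 p.2 then 1 else 0 := by
  unfold buildHubertMatrix
  simp only [dictClusters_items]
  have hInv : InvA (PySem.List.enumerate C) (PySem.Dict.empty) := by
    intro q; left; exact PySem.Dict.get?_empty _
  rw [PySem.Dict.getD_eq_get?_getD, foldl_hubStep_get _ pairs _ hInv p hp,
    condA_enumerate]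
  rfl

theorem foldl_sum_eq_countP (pairs : List (Int × Int))
    (f g : Int × Int → Bool) (acc : Int) :
    pairs.foldl (fun index pair =>
        index + (if f pair then (1:Int) else 0) * (if g pair then (1:Int) else 0)) acc
      = acc + (pairs.countP (fun p => f p && g p) : Nat) := by
  induction pairs generalizing acc with
  | nil => simp
  | cons p rest ih =>
    simp only [List.foldl_cons, List.countP_cons, ih]
    by_cases hf : f p = true <;> by_cases hg : g p = true <;>
      simp [hf, hg] <;> omega

-- ===== VERDICT (by name: the statement is the Claim_ definition above) =====
theorem huberts_spec : Claim_equal_huberts := by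
  intro C P _
  unfold Spec_huberts huberts huberts_alt
  simp only []
  -- rewrite A's summand via the dict characterisation, valid for every pair in the list
  rw [PySem.List.foldl_congr_mem
    (g := fun index pair =>
      index + (if coB C pair.1 pair.2 then (1:Int) else 0)
            * (if coB P pair.1 pair.2 then (1:Int) else 0))
    (h := by
      intro acc p hp
      rw [buildHubertMatrix_getD C _ p hp, buildHubertMatrix_getD P _ p hp])]
  rw [foldl_sum_eq_countP, combos2_map, List.countP_map]
  simp only [zero_add]
  congr 1
  apply List.countP_congr
  intro p _
  simp only [Function.comp_def, Prod.map, meetsB_sigB]
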